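-- pv_equiv track=rewrite | github.com/Eon-Labs/gapless-crypto-data | docs/ultrathink/validation/help_snapshotter.py | _analyze_change_types
-- ===== SOURCE A (Python) =====
-- from typing import Dict, List, Any, Optional, Tuple
--
-- def _analyze_change_types(detailed_changes: Dict[str, Any]) -> Dict[str, int]:
--     """Analyze types of changes detected."""
--     change_type_counts = {
--         "signature_changes": 0,
--         "docstring_changes": 0,
--         "module_changes": 0,
--         "output_length_changes": 0
--     }
--
--     for element_name, change_details in detailed_changes.items():
--         changes_detected = change_details.get("changes_detected", [])
--
--         if "signature_changed" in changes_detected: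
--             change_type_counts["signature_changes"] += 1
--
--         if "docstring_changed" in changes_detected:
--             change_type_counts["docstring_changes"] += 1
--
--         if "module_changed" in changes_detected:
--             change_type_counts["module_changes"] += 1
--
--         if "output_length_changed" in changes_detected:
--             change_type_counts["output_length_changes"] += 1
--
--     return change_type_counts
-- ===== SOURCE B (Python) =====
-- def _analyze_change_types(detailed_changes):
--     """Analyze types of changes detected."""
--     def count(token):
--         return sum(1 for cd in detailed_changes.values()
--                    if token in cd.get("changes_detected", []))
--     return {
--         "signature_changes": count("signature_changed"),
--         "docstring_changes": count("docstring_changed"),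
--         "module_changes": count("module_changed"),
--         "output_length_changes": count("output_length_changed"),
--     }
-- ===== Notes on version B (the rewrite author's own statement) =====
-- stated objective: simpler
-- what changed: Replaces the single stateful loop that mutates a four-key counter dict with four independent per-category counting passes (sum of a generator over the values), building the result dict in one literal expression.
import Mathlib
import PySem

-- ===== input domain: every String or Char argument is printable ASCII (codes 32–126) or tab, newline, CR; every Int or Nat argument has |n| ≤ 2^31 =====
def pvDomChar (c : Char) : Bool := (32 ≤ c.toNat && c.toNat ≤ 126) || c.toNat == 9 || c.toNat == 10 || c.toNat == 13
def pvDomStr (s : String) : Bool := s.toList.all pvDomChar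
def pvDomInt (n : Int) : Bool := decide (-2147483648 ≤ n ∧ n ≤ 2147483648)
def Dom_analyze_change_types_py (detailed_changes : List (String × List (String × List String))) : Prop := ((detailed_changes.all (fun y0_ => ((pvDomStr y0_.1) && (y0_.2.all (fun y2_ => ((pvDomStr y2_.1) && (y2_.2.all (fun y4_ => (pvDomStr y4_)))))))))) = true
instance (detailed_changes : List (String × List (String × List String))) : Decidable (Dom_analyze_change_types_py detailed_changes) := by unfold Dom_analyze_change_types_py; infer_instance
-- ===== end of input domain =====

-- B replaces A's single stateful loop over a mutable 4-key counter dict by four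
-- independent per-category counting passes over the values (objective: simpler).

-- ===== PORT A =====
-- one element's update of the counter dict (the loop body of A)
def pvStepA (d : PySem.Dict String Int)
    (e : String × List (String × List String)) : PySem.Dict String Int :=
  let cds := PySem.Dict.getD (PySem.Dict.mk e.2) "changes_detected" []
  let d := if cds.contains "signature_changed" then
      d.insert "signature_changes" (d.getD "signature_changes" 0 + 1) else d
  let d := if cds.contains "docstring_changed" then
      d.insert "docstring_changes" (d.getD "docstring_changes" 0 + 1) else d
  let d := if cds.contains "module_changed" then
      d.insert "module_changes" (d.getD "module_changes" 0 + 1) else d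
  let d := if cds.contains "output_length_changed" then
      d.insert "output_length_changes" (d.getD "output_length_changes" 0 + 1) else d
  d

def analyze_change_types_py (detailed_changes : List (String × List (String × List String))) : List (String × Int) :=
  (detailed_changes.foldl pvStepA
    (PySem.Dict.mk [("signature_changes", 0), ("docstring_changes", 0),
                    ("module_changes", 0), ("output_length_changes", 0)])).items

-- ===== PORT B =====
-- B's helper: sum(1 for cd in detailed_changes.values() if token in cd.get("changes_detected", []))
def pvCount (detailed_changes : List (String × List (String × List String))) (token : String) : Int :=
  (detailed_changes.countP
    (fun e => (PySem.Dict.getD (PySem.Dict.mk e.2) "changes_detected" []).contains token) : Int)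

def analyze_change_types_py_alt (detailed_changes : List (String × List (String × List String))) : List (String × Int) :=
  [("signature_changes", pvCount detailed_changes "signature_changed"),
   ("docstring_changes", pvCount detailed_changes "docstring_changed"),
   ("module_changes", pvCount detailed_changes "module_changed"),
   ("output_length_changes", pvCount detailed_changes "output_length_changed")]

-- ===== PRECONDITION & SPEC =====
def Spec_analyze_change_types_py (detailed_changes : List (String × List (String × List String))) (out : List (String × Int)) : Prop := out = analyze_change_types_py_alt detailed_changes
instance (detailed_changes : List (String × List (String × List String))) (out : List (String × Int)) : Decidable (Spec_analyze_change_types_py detailed_changes out) := by unfold Spec_analyze_change_types_py; infer_instance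

-- ===== CLAIM (what is proved, stated in full; the proofs are below) =====
def Claim_equal_analyze_change_types_py : Prop := ∀ (detailed_changes : List (String × List (String × List String))), Dom_analyze_change_types_py detailed_changes → Spec_analyze_change_types_py detailed_changes (analyze_change_types_py detailed_changes)

-- ===== LEMMAS AND PROOFS =====

-- the 4-key counter dict A's loop maintains
def pvDict4 (a b c d : Int) : PySem.Dict String Int :=
  PySem.Dict.mk [("signature_changes", a), ("docstring_changes", b),
                 ("module_changes", c), ("output_length_changes", d)]

theorem pvGet1 (a b c d : Int) : (pvDict4 a b c d).getD "signature_changes" 0 = a := rfl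
theorem pvGet2 (a b c d : Int) : (pvDict4 a b c d).getD "docstring_changes" 0 = b := rfl
theorem pvGet3 (a b c d : Int) : (pvDict4 a b c d).getD "module_changes" 0 = c := rfl
theorem pvGet4 (a b c d : Int) : (pvDict4 a b c d).getD "output_length_changes" 0 = d := rfl
theorem pvIns1 (a b c d x : Int) : (pvDict4 a b c d).insert "signature_changes" x = pvDict4 x b c d := rfl
theorem pvIns2 (a b c d x : Int) : (pvDict4 a b c d).insert "docstring_changes" x = pvDict4 a x c d := rfl
theorem pvIns3 (a b c d x : Int) : (pvDict4 a b c d).insert "module_changes" x = pvDict4 a b x d := rfl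
theorem pvIns4 (a b c d x : Int) : (pvDict4 a b c d).insert "output_length_changes" x = pvDict4 a b c x := rfl

theorem pvStepA_dict4 (a b c d : Int) (e : String × List (String × List String)) :
    pvStepA (pvDict4 a b c d) e =
      pvDict4
        (if (PySem.Dict.getD (PySem.Dict.mk e.2) "changes_detected" []).contains "signature_changed" then a + 1 else a)
        (if (PySem.Dict.getD (PySem.Dict.mk e.2) "changes_detected" []).contains "docstring_changed" then b + 1 else b)
        (if (PySem.Dict.getD (PySem.Dict.mk e.2) "changes_detected" []).contains "module_changed" then c + 1 else c)
        (if (PySem.Dict.getD (PySem.Dict.mk e.2) "changes_detected" []).contains "output_length_changed" then d + 1 else d) := by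
  show (pvStepA (pvDict4 a b c d) e) = _
  simp only [pvStepA]
  split_ifs <;> simp only [pvGet1, pvGet2, pvGet3, pvGet4, pvIns1, pvIns2, pvIns3, pvIns4]

theorem pvLoopA (l : List (String × List (String × List String))) (a b c d : Int) :
    (l.foldl pvStepA (pvDict4 a b c d)).items =
      [("signature_changes", a + pvCount l "signature_changed"),
       ("docstring_changes", b + pvCount l "docstring_changed"),
       ("module_changes", c + pvCount l "module_changed"),
       ("output_length_changes", d + pvCount l "output_length_changed")] := by
  induction l generalizing a b c d with
  | nil => simp [pvCount, pvDict4]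
  | cons e t ih =>
    rw [List.foldl_cons, pvStepA_dict4, ih]
    simp only [pvCount, List.countP_cons]
    split_ifs <;> simp <;> omega

-- ===== VERDICT (by name: the statement is the Claim_ definition above) =====
theorem analyze_change_types_py_spec : Claim_equal_analyze_change_types_py := by
  intro dc _
  unfold Spec_analyze_change_types_py analyze_change_types_py analyze_change_types_py_alt
  have h := pvLoopA dc 0 0 0 0
  simp only [pvDict4, zero_add] at h
  exact h
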